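-- pv_equiv track=rewrite | github.com/KastnerRG/hls4ml-backend | aie_pl/gen.py | system_cfg
-- ===== SOURCE A (Python) =====
-- def system_cfg(segs):
--     L = ['[connectivity]', 'nk=mm2s:1:mm2s', 'nk=s2mm:1:s2mm']
--     for t, gi, _ in segs:
--         if t == 'pl': L.append(f'nk=pl_group{gi}:1:pl_group{gi}')
--     L.append('')
--     prev = 'mm2s.s'
--     for t, gi, _ in segs:
--         if t == 'aie':
--             L.append(f'sc={prev}:ai_engine_0.g{gi}_in'); prev = f'ai_engine_0.g{gi}_out'
--         else:
--             L.append(f'sc={prev}:pl_group{gi}.in_s');    prev = f'pl_group{gi}.out_s'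
--     L.append(f'sc={prev}:s2mm.s')
--     return "\n".join(L) + "\n"
-- ===== SOURCE B (Python) =====
-- def system_cfg(segs):
--     L = ['[connectivity]', 'nk=mm2s:1:mm2s', 'nk=s2mm:1:s2mm']
--     L += [f'nk=pl_group{gi}:1:pl_group{gi}' for t, gi, _ in segs if t == 'pl']
--     L.append('')
--     # flat endpoint list: mm2s source, then each segment's in/out port, then s2mm sink
--     eps = ['mm2s.s'] + [p for t, gi, _ in segs for p in (
--         (f'ai_engine_0.g{gi}_in', f'ai_engine_0.g{gi}_out') if t == 'aie'
--         else (f'pl_group{gi}.in_s', f'pl_group{gi}.out_s'))] + ['s2mm.s']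
--     it = iter(eps)
--     L += [f'sc={a}:{b}' for a, b in zip(it, it)]
--     return "\n".join(L) + "\n"
-- ===== Notes on version B (the rewrite author's own statement) =====
-- stated objective: alternative
-- what changed: Replaces A's stateful second loop with its 'prev' accumulator by building a flat endpoints list (mm2s source, each segment's in/out port, s2mm sink) via comprehensions and pairing consecutive endpoints with zip(it, it); the pl_group nk lines become a comprehension too.
import Mathlib
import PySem

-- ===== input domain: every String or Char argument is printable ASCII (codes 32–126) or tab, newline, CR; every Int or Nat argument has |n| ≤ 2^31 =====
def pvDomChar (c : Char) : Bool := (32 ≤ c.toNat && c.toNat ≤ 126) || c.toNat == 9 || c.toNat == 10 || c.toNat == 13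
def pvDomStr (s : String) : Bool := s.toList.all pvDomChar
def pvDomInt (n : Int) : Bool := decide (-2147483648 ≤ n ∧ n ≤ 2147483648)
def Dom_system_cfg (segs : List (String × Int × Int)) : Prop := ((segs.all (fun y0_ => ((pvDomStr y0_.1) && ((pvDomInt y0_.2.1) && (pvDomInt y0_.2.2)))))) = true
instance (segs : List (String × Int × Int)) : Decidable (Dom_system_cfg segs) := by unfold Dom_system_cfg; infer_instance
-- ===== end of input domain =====

-- B replaces A's stateful sc-line loop (the 'prev' accumulator) by a flat endpoints list
-- paired up two at a time; same output, same cost (objective: alternative).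

-- ===== PORT A =====
def system_cfg (segs : List (String × Int × Int)) : String :=
  let L0 : List String := ["[connectivity]", "nk=mm2s:1:mm2s", "nk=s2mm:1:s2mm"]
  let L1 := segs.foldl (fun L t =>
      if t.1 == "pl" then
        L ++ ["nk=pl_group" ++ PySem.Int.toStr t.2.1 ++ ":1:pl_group" ++ PySem.Int.toStr t.2.1]
      else L) L0
  let L2 := L1 ++ [""]
  let s := segs.foldl (fun (p : List String × String) t =>
      if t.1 == "aie" then
        (p.1 ++ ["sc=" ++ p.2 ++ ":ai_engine_0.g" ++ PySem.Int.toStr t.2.1 ++ "_in"],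
         "ai_engine_0.g" ++ PySem.Int.toStr t.2.1 ++ "_out")
      else
        (p.1 ++ ["sc=" ++ p.2 ++ ":pl_group" ++ PySem.Int.toStr t.2.1 ++ ".in_s"],
         "pl_group" ++ PySem.Int.toStr t.2.1 ++ ".out_s")) (L2, "mm2s.s")
  let L3 := s.1 ++ ["sc=" ++ s.2 ++ ":s2mm.s"]
  PySem.Str.join "\n" L3 ++ "\n"

-- ===== PORT B =====
-- zip(it, it) on one iterator pairs consecutive elements: ported as this structural recursion
def pairUp : List String → List (String × String)
  | a :: b :: rest => (a, b) :: pairUp rest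
  | _ => []

def system_cfg_alt (segs : List (String × Int × Int)) : String :=
  let L1 : List String :=
    ["[connectivity]", "nk=mm2s:1:mm2s", "nk=s2mm:1:s2mm"]
    ++ segs.filterMap (fun t =>
        if t.1 == "pl" then
          some ("nk=pl_group" ++ PySem.Int.toStr t.2.1 ++ ":1:pl_group" ++ PySem.Int.toStr t.2.1)
        else none)
    ++ [""]
  let eps : List String :=
    ["mm2s.s"]
    ++ segs.flatMap (fun t =>
        if t.1 == "aie" then
          ["ai_engine_0.g" ++ PySem.Int.toStr t.2.1 ++ "_in",
           "ai_engine_0.g" ++ PySem.Int.toStr t.2.1 ++ "_out"]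
        else
          ["pl_group" ++ PySem.Int.toStr t.2.1 ++ ".in_s",
           "pl_group" ++ PySem.Int.toStr t.2.1 ++ ".out_s"])
    ++ ["s2mm.s"]
  let L2 := L1 ++ (pairUp eps).map (fun ab => "sc=" ++ ab.1 ++ ":" ++ ab.2)
  PySem.Str.join "\n" L2 ++ "\n"

-- ===== PRECONDITION & SPEC =====
def Spec_system_cfg (segs : List (String × Int × Int)) (out : String) : Prop := out = system_cfg_alt segs
instance (segs : List (String × Int × Int)) (out : String) : Decidable (Spec_system_cfg segs out) := by unfold Spec_system_cfg; infer_instance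

-- ===== CLAIM (what is proved, stated in full; the proofs are below) =====
def Claim_equal_system_cfg : Prop := ∀ (segs : List (String × Int × Int)), Dom_system_cfg segs → Spec_system_cfg segs (system_cfg segs)

-- ===== LEMMAS AND PROOFS =====

-- A's first loop (append-if fold) builds the same list as B's filterMap comprehension
theorem nk_loop_eq (segs : List (String × Int × Int)) (L : List String) :
    segs.foldl (fun L t =>
      if t.1 = "pl" then
        L ++ ["nk=pl_group" ++ PySem.Int.toStr t.2.1 ++ ":1:pl_group" ++ PySem.Int.toStr t.2.1]
      else L) L
    = L ++ segs.filterMap (fun t =>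
        if t.1 = "pl" then
          some ("nk=pl_group" ++ PySem.Int.toStr t.2.1 ++ ":1:pl_group" ++ PySem.Int.toStr t.2.1)
        else none) := by
  induction segs generalizing L with
  | nil => simp
  | cons t rest ih =>
      rw [List.foldl_cons, List.filterMap_cons]
      by_cases h : t.1 = "pl" <;> simp [h, ih]

-- merging of adjacent string literals under reassociation
theorem colon_aie (x : String) : ":" ++ ("ai_engine_0.g" ++ x) = ":ai_engine_0.g" ++ x := by
  rw [← String.append_assoc]
  congr 1

theorem colon_pl (x : String) : ":" ++ ("pl_group" ++ x) = ":pl_group" ++ x := by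
  rw [← String.append_assoc]
  congr 1

-- A's second loop with its 'prev' accumulator equals B's pairing of the endpoints list
theorem sc_loop_eq (segs : List (String × Int × Int)) (L : List String) (prev : String) :
    (segs.foldl (fun (p : List String × String) t =>
      if t.1 = "aie" then
        (p.1 ++ ["sc=" ++ p.2 ++ ":ai_engine_0.g" ++ PySem.Int.toStr t.2.1 ++ "_in"],
         "ai_engine_0.g" ++ PySem.Int.toStr t.2.1 ++ "_out")
      else
        (p.1 ++ ["sc=" ++ p.2 ++ ":pl_group" ++ PySem.Int.toStr t.2.1 ++ ".in_s"],
         "pl_group" ++ PySem.Int.toStr t.2.1 ++ ".out_s")) (L, prev)).1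
    ++ ["sc=" ++ (segs.foldl (fun (p : List String × String) t =>
      if t.1 = "aie" then
        (p.1 ++ ["sc=" ++ p.2 ++ ":ai_engine_0.g" ++ PySem.Int.toStr t.2.1 ++ "_in"],
         "ai_engine_0.g" ++ PySem.Int.toStr t.2.1 ++ "_out")
      else
        (p.1 ++ ["sc=" ++ p.2 ++ ":pl_group" ++ PySem.Int.toStr t.2.1 ++ ".in_s"],
         "pl_group" ++ PySem.Int.toStr t.2.1 ++ ".out_s")) (L, prev)).2 ++ ":s2mm.s"]
    = L ++ (pairUp (prev :: (segs.flatMap (fun t =>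
        if t.1 = "aie" then
          ["ai_engine_0.g" ++ PySem.Int.toStr t.2.1 ++ "_in",
           "ai_engine_0.g" ++ PySem.Int.toStr t.2.1 ++ "_out"]
        else
          ["pl_group" ++ PySem.Int.toStr t.2.1 ++ ".in_s",
           "pl_group" ++ PySem.Int.toStr t.2.1 ++ ".out_s"]) ++ ["s2mm.s"]))).map
        (fun ab => "sc=" ++ ab.1 ++ ":" ++ ab.2) := by
  induction segs generalizing L prev with
  | nil => simp [pairUp, String.append_assoc]
  | cons t rest ih =>
      simp only [String.append_assoc] at ih
      rw [List.foldl_cons, List.flatMap_cons]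
      by_cases h : t.1 = "aie" <;>
        simp [h, ih, pairUp, String.append_assoc, colon_aie, colon_pl]

theorem system_cfg_eq_alt (segs : List (String × Int × Int)) :
    system_cfg segs = system_cfg_alt segs := by
  unfold system_cfg system_cfg_alt
  simp only [beq_iff_eq]
  rw [nk_loop_eq, sc_loop_eq]
  simp [List.append_assoc]

-- ===== VERDICT (by name: the statement is the Claim_ definition above) =====
theorem system_cfg_spec : Claim_equal_system_cfg := by
  intro segs _
  unfold Spec_system_cfg
  exact system_cfg_eq_alt segs
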